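-- pv_equiv track=rewrite | github.com/AniT20EXPERT/Smart_Task_Manager | BACKEND/scheduler.py | merge_consecutive
-- ===== SOURCE A (Python) =====
-- from typing import List, Dict, Any
--
-- def merge_consecutive(schedule: List[Dict[str, Any]]) -> List[Dict[str, Any]]:
--     """Merge consecutive entries of the same task on the same date."""
--     if not schedule:
--         return []
--
--     merged = []
--     current = schedule[0].copy()
--
--     for entry in schedule[1:]:
--         # Check if same task, same date, and consecutive times
--         if (entry['task'] == current['task'] and
--                 entry['date'] == current['date'] and
--                 entry['start'] == current['end']):
--             # Merge by extending end time
--             current['end'] = entry['end']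
--         else:
--             # Save current and start new one
--             merged.append(current)
--             current = entry.copy()
--
--     merged.append(current)
--     return merged
-- ===== SOURCE B (Python) =====
-- def merge_consecutive(schedule):
--     """Merge consecutive entries of the same task on the same date."""
--     out = []
--     i = 0
--     n = len(schedule)
--     while i < n:
--         head = schedule[i]
--         prev = head
--         j = i + 1
--         while j < n:
--             e = schedule[j]
--             if not (e['task'] == prev['task'] and e['date'] == prev['date']
--                     and e['start'] == prev['end']):
--                 break
--             prev = e
--             j += 1
--         merged = head.copy()
--         if j > i + 1:
--             merged['end'] = prev['end']
--         out.append(merged)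
--         i = j
--     return out
-- ===== Notes on version B (the rewrite author's own statement) =====
-- stated objective: alternative
-- what changed: B replaces A's emit-while-scanning accumulator (which mutates a 'current' dict per element) by a two-pointer run scanner: an inner loop advances j over the maximal chain of consecutively-chaining entries starting at i, then one output entry is built per run (copy of the run's first entry with 'end' set to the run's last 'end'), and i jumps to j.
import Mathlib
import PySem

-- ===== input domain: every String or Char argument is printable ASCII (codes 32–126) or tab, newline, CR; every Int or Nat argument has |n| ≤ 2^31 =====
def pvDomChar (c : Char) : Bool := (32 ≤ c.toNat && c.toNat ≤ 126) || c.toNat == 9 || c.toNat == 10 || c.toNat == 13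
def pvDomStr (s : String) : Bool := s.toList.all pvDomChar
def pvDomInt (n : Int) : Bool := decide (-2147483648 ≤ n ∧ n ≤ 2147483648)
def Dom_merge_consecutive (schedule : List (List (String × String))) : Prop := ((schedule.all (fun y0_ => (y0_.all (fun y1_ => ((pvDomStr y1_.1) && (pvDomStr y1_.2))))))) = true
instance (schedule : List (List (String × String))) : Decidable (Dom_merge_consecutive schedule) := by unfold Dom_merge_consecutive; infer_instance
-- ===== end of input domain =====

-- B replaces A's emit-while-scanning accumulator by a two-pointer run scanner: consume each
-- maximal chain of consecutive entries, emit one entry per run (objective: alternative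
-- decomposition, same cost; return value only — neither program mutates its argument).

-- dict helpers on association lists (first-match lookup, overwrite-in-place insert), via PySem.Dict
def pvGetD (d : List (String × String)) (k dflt : String) : String :=
  (PySem.Dict.mk d).getD k dflt

def pvInsert (d : List (String × String)) (k v : String) : List (String × String) :=
  ((PySem.Dict.mk d).insert k v).items

-- the chain condition shared by both Pythons (A tests it against the accumulated
-- `current`, B against the previous raw entry)
def pvCond (entry cur : List (String × String)) : Bool :=
  (pvGetD entry "task" "" == pvGetD cur "task" "") &&
  (pvGetD entry "date" "" == pvGetD cur "date" "") &&
  (pvGetD entry "start" "" == pvGetD cur "end" "")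

-- ===== PORT A =====
def merge_consecutive (schedule : List (List (String × String))) : List (List (String × String)) :=
  match schedule with
  | [] => []
  | first :: rest =>
    let st := rest.foldl
      (fun (st : List (List (String × String)) × List (String × String)) entry =>
        if pvCond entry st.2 then
          (st.1, pvInsert st.2 "end" (pvGetD entry "end" ""))
        else
          (st.1 ++ [st.2], entry))
      (([] : List (List (String × String))), first)
    st.1 ++ [st.2]

-- ===== PORT B =====
-- B's inner while loop (advance j over the maximal chain starting after `prev`); it returns
-- (last entry of the run, remaining suffix, number of entries consumed) — the list suffix and
-- the counter play the role of B's index j.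
def pvEat (prev : List (String × String)) (rest : List (List (String × String))) (n : Nat) :
    List (String × String) × List (List (String × String)) × Nat :=
  match rest with
  | [] => (prev, [], n)
  | e :: t => if pvCond e prev then pvEat e t (n + 1) else (prev, e :: t, n)

lemma pvEat_rem_le (rest : List (List (String × String))) (prev : List (String × String)) (n : Nat) :
    (pvEat prev rest n).2.1.length ≤ rest.length := by
  induction rest generalizing prev n with
  | nil => simp [pvEat]
  | cons e t ih =>
    simp only [pvEat]
    split
    · exact le_trans (ih e (n + 1)) (Nat.le_succ _)
    · simp

-- B's outer while loop: one output entry per run, then jump to the remainder.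
def merge_consecutive_alt : List (List (String × String)) → List (List (String × String))
  | [] => []
  | head :: rest =>
    let r := pvEat head rest 0
    (if r.2.2 ≠ 0 then pvInsert head "end" (pvGetD r.1 "end" "") else head) ::
      merge_consecutive_alt r.2.1
  termination_by s => s.length
  decreasing_by
    exact Nat.lt_succ_of_le (pvEat_rem_le rest head 0)

-- ===== PRECONDITION & SPEC =====
def pvHas (e : List (String × String)) (k : String) : Bool := (PySem.Dict.mk e).contains k

-- Pre_ excludes exactly the inputs on which Python A raises KeyError: a schedule of length ≥ 2
-- where an entry lacks 'task', or an adjacent pair lacks a key the short-circuiting merge test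
-- (or the merge itself) actually reads.
def Pre_merge_consecutive (schedule : List (List (String × String))) : Prop :=
  schedule.length ≤ 1 ∨
    ((∀ e ∈ schedule, pvHas e "task" = true) ∧
     ∀ pe ∈ schedule.zip schedule.tail,
       pvGetD pe.1 "task" "" = pvGetD pe.2 "task" "" →
         pvHas pe.1 "date" = true ∧ pvHas pe.2 "date" = true ∧
         (pvGetD pe.1 "date" "" = pvGetD pe.2 "date" "" →
           pvHas pe.1 "end" = true ∧ pvHas pe.2 "start" = true ∧
           (pvGetD pe.2 "start" "" = pvGetD pe.1 "end" "" → pvHas pe.2 "end" = true)))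
instance (schedule : List (List (String × String))) : Decidable (Pre_merge_consecutive schedule) := by
  unfold Pre_merge_consecutive; infer_instance

def pvWitness_merge_consecutive : (List (List (String × String))) :=
  [[("task", "a"), ("date", "d1"), ("start", "09:00"), ("end", "10:00")],
   [("task", "a"), ("date", "d1"), ("start", "10:00"), ("end", "11:00")]]

def Spec_merge_consecutive (schedule : List (List (String × String))) (out : List (List (String × String))) : Prop := out = merge_consecutive_alt schedule
instance (schedule : List (List (String × String))) (out : List (List (String × String))) : Decidable (Spec_merge_consecutive schedule out) := by unfold Spec_merge_consecutive; infer_instance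

-- ===== CLAIM (what is proved, stated in full; the proofs are below) =====
def Claim_equal_merge_consecutive : Prop := ∀ (schedule : List (List (String × String))), Dom_merge_consecutive schedule → Pre_merge_consecutive schedule → Spec_merge_consecutive schedule (merge_consecutive schedule)

-- ===== LEMMAS AND PROOFS =====

lemma pvGetD_insert_self (d : List (String × String)) (k v : String) :
    pvGetD (pvInsert d k v) k "" = v := by
  show ((PySem.Dict.mk d).insert k v).getD k "" = v
  exact PySem.Dict.getD_insert_self _ _ _ _

lemma pvGetD_insert_of_ne (d : List (String × String)) (k k' v : String) (h : k' ≠ k) :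
    pvGetD (pvInsert d k v) k' "" = pvGetD d k' "" := by
  show ((PySem.Dict.mk d).insert k v).getD k' "" = (PySem.Dict.mk d).getD k' ""
  simp [PySem.Dict.getD_insert, h]

lemma pvInsert_insert (d : List (String × String)) (k v w : String) :
    pvInsert (pvInsert d k v) k w = pvInsert d k w := by
  show (((PySem.Dict.mk d).insert k v).insert k w).items = ((PySem.Dict.mk d).insert k w).items
  rw [PySem.Dict.insert_insert_self]

-- the counter argument of pvEat only offsets the returned count
lemma pvEat_n (t : List (List (String × String))) (p : List (String × String)) (n : Nat) :
    pvEat p t n = ((pvEat p t 0).1, (pvEat p t 0).2.1, n + (pvEat p t 0).2.2) := by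
  induction t generalizing p n with
  | nil => simp [pvEat]
  | cons e t ih =>
    simp only [pvEat]
    split
    · rw [ih e (n + 1), ih e 1]
      simp [Nat.add_assoc, Nat.add_comm 1]
    · simp

-- a run of length 0 keeps its starting entry
lemma pvEat_last_of_zero (t : List (List (String × String))) (p : List (String × String))
    (h : (pvEat p t 0).2.2 = 0) : (pvEat p t 0).1 = p := by
  cases t with
  | nil => rfl
  | cons e t' =>
    by_cases hc : pvCond e p = true
    · exfalso
      have h1 : (pvEat e t' 1).2.2 = 0 := by simpa [pvEat, hc] using h
      rw [pvEat_n t' e 1] at h1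
      simp at h1
    · simp [pvEat, hc]

-- the main simulation: A's fold from state (merged, current) equals "emit merged, then B's
-- run-consumption", provided current agrees with lastp on the three keys the chain test reads
lemma pvLoop_eq (rest : List (List (String × String)))
    (merged : List (List (String × String))) (current lastp : List (String × String))
    (ht : pvGetD current "task" "" = pvGetD lastp "task" "")
    (hd : pvGetD current "date" "" = pvGetD lastp "date" "")
    (he : pvGetD current "end" "" = pvGetD lastp "end" "") :
    (let st := rest.foldl
        (fun (st : List (List (String × String)) × List (String × String)) entry =>
          if pvCond entry st.2 then (st.1, pvInsert st.2 "end" (pvGetD entry "end" ""))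
          else (st.1 ++ [st.2], entry)) (merged, current)
     st.1 ++ [st.2]) =
    merged ++ ((let r := pvEat lastp rest 0
      (if r.2.2 ≠ 0 then pvInsert current "end" (pvGetD r.1 "end" "") else current) ::
        merge_consecutive_alt r.2.1)) := by
  induction rest generalizing merged current lastp with
  | nil => simp [pvEat, merge_consecutive_alt]
  | cons e t ih =>
    have hcond : pvCond e current = pvCond e lastp := by
      simp [pvCond, ht, hd, he]
    by_cases hb : pvCond e lastp = true
    · -- chain continues
      have hb2 : pvCond e current = true := by rw [hcond]; exact hb
      obtain ⟨⟨h1, h2⟩, h3⟩ : (_ ∧ _) ∧ _ := by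
        simpa [pvCond, Bool.and_eq_true, beq_iff_eq] using hb2
      simp only [List.foldl_cons, hb2, hb, if_pos, pvEat]
      have ht' : pvGetD (pvInsert current "end" (pvGetD e "end" "")) "task" "" = pvGetD e "task" "" := by
        rw [pvGetD_insert_of_ne _ _ _ _ (by decide), h1, ht]
      have hd' : pvGetD (pvInsert current "end" (pvGetD e "end" "")) "date" "" = pvGetD e "date" "" := by
        rw [pvGetD_insert_of_ne _ _ _ _ (by decide), h2, hd]
      have he' : pvGetD (pvInsert current "end" (pvGetD e "end" "")) "end" "" = pvGetD e "end" "" := by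
        rw [pvGetD_insert_self]
      rw [ih merged _ e ht' hd' he']
      rw [pvEat_n t e 1]
      by_cases hz : (pvEat e t 0).2.2 = 0
      · rw [pvEat_last_of_zero t e hz]
        simp [hz]
      · simp [hz, pvInsert_insert]
    · -- run ends here: A emits current, B emits its run entry and restarts at e
      have hb2 : ¬ pvCond e current = true := by rw [hcond]; exact hb
      simp only [List.foldl_cons, if_neg hb2]
      rw [ih (merged ++ [current]) e e rfl rfl rfl]
      have hE : pvEat lastp (e :: t) 0 = (lastp, e :: t, 0) := by simp [pvEat, hb]
      rw [hE, merge_consecutive_alt]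
      simp

-- ===== VERDICT (by name: the statement is the Claim_ definition above) =====
theorem merge_consecutive_spec : Claim_equal_merge_consecutive := by
  intro schedule _ _
  unfold Spec_merge_consecutive
  cases schedule with
  | nil => simp [merge_consecutive, merge_consecutive_alt]
  | cons first rest =>
    show _ = merge_consecutive_alt (first :: rest)
    rw [merge_consecutive_alt]
    exact pvLoop_eq rest [] first first rfl rfl rfl
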